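-- pv_equiv track=rewrite | github.com/larsesser/qcodeplot3d | framework/cc_3d/plotter.py | reconvert_faces
-- ===== SOURCE A (Python) =====
-- def reconvert_faces(faces: list[int]) -> list[list[int]]:
--     ret = []
--     iterator = iter(faces)
--     while True:
--         try:
--             next_face_length = next(iterator)
--         except StopIteration:
--             break
--         ret.append([next(iterator) for _ in range(next_face_length)])
--     return ret
-- ===== SOURCE B (Python) =====
-- def reconvert_faces(faces: list[int]) -> list[list[int]]:
--     ret = []
--     remaining = 0
--     for x in faces:
--         if remaining > 0:
--             ret[-1].append(x)
--             remaining -= 1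
--         else:
--             ret.append([])
--             remaining = x
--     if remaining > 0:
--         raise ValueError("truncated faces list: last face is missing elements")
--     return ret
-- ===== Notes on version B (the rewrite author's own statement) =====
-- stated objective: simpler
-- what changed: Replaces A's iterator pulls (a while True/try/except loop with an inner list comprehension consuming next() per element) with a single plain for-loop state machine keeping a countdown of elements still owed to the current face; Pre_ excludes truncated input, on which A raises StopIteration and B raises ValueError.
import Mathlib
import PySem

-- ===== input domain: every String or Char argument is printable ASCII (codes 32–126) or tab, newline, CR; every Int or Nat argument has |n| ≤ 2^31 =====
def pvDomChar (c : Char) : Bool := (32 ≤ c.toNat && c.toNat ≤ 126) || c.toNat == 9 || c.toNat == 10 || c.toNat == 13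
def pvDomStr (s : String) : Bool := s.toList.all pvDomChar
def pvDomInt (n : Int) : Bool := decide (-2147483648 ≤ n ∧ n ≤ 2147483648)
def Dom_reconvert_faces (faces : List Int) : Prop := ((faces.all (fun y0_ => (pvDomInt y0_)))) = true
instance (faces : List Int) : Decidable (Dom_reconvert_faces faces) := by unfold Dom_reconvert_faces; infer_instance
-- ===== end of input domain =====

-- B replaces A's iterator-pull loop with a one-pass for-loop state machine (a countdown of
-- elements owed to the current face); Pre_ excludes truncated input, on which both Pythons raise.


-- ===== PORT A =====
-- A pulls one length prefix, then pulls `length` elements one by one (the list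
-- comprehension over range(length)); `take`/`drop` of toNat model those pulls —
-- exact on Pre_ (A raises StopIteration when the pulls run past the end).
def reconvert_facesA_loop : List Int → List (List Int)
  | [] => []
  | n :: rest => rest.take n.toNat :: reconvert_facesA_loop (rest.drop n.toNat)
termination_by l => l.length
decreasing_by simp

def reconvert_faces (faces : List Int) : List (List Int) := reconvert_facesA_loop faces

-- ===== PORT B =====
-- Source B's in-place `ret[-1].append(x)` modeled by rebuilding the last list (exact: same value).
def pyAppendLast (l : List (List Int)) (x : Int) : List (List Int) :=
  match l with
  | [] => []
  | [f] => [f ++ [x]]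
  | f :: rest => f :: pyAppendLast rest x

-- one iteration of Source B's for-loop over state (ret, remaining)
def reconvert_facesB_step (s : List (List Int) × Int) (x : Int) : List (List Int) × Int :=
  if s.2 > 0 then (pyAppendLast s.1 x, s.2 - 1)
  else (s.1 ++ [[]], x)

def reconvert_faces_alt (faces : List Int) : List (List Int) :=
  let s := faces.foldl reconvert_facesB_step ([], 0)
  if s.2 > 0 then []  -- Source B: raise ValueError (truncated input; outside Pre_)
  else s.1

-- ===== PRECONDITION & SPEC =====
-- Pre_ excludes truncated input (a length prefix claiming more elements than remain),
-- on which A raises StopIteration and B raises ValueError; `skip` counts elements owed.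
def pvWellFormed (skip : Nat) : List Int → Bool
  | [] => skip == 0
  | x :: rest => if skip > 0 then pvWellFormed (skip - 1) rest else pvWellFormed x.toNat rest

def Pre_reconvert_faces (faces : List Int) : Prop := pvWellFormed 0 faces = true
instance (faces : List Int) : Decidable (Pre_reconvert_faces faces) := by
  unfold Pre_reconvert_faces; infer_instance

def pvWitness_reconvert_faces : List Int := [3, 1, 2, 3, -1, 0, 2, 7, 8]

def Spec_reconvert_faces (faces : List Int) (out : List (List Int)) : Prop := out = reconvert_faces_alt faces
instance (faces : List Int) (out : List (List Int)) : Decidable (Spec_reconvert_faces faces out) := by unfold Spec_reconvert_faces; infer_instance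

-- ===== CLAIM (what is proved, stated in full; the proofs are below) =====
def Claim_equal_reconvert_faces : Prop := ∀ (faces : List Int), Dom_reconvert_faces faces → Pre_reconvert_faces faces → Spec_reconvert_faces faces (reconvert_faces faces)

-- ===== LEMMAS AND PROOFS =====

-- recursive restatement of well-formedness, used by the induction
def pvWF : List Int → Bool
  | [] => true
  | n :: rest => n.toNat ≤ rest.length && pvWF (rest.drop n.toNat)
termination_by l => l.length
decreasing_by simp

theorem pvWellFormed_eq_pvWF (l : List Int) (skip : Nat) :
    pvWellFormed skip l = (decide (skip ≤ l.length) && pvWF (l.drop skip)) := by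
  induction l generalizing skip with
  | nil => cases skip <;> simp [pvWellFormed, pvWF]
  | cons x rest ih =>
    rw [pvWellFormed]
    by_cases hs : skip > 0
    · have h1 : (x :: rest).drop skip = rest.drop (skip - 1) := by
        obtain ⟨k, rfl⟩ : ∃ k, skip = k + 1 := ⟨skip - 1, by omega⟩
        simp
      rw [if_pos hs, ih, h1]
      have : (decide (skip - 1 ≤ rest.length)) = (decide (skip ≤ (x :: rest).length)) := by
        simp only [decide_eq_decide, List.length_cons]; omega
      rw [this]
    · have hs0 : skip = 0 := by omega
      subst hs0
      rw [if_neg hs, ih]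
      simp [pvWF]

theorem pyAppendLast_snoc (ret : List (List Int)) (f : List Int) (x : Int) :
    pyAppendLast (ret ++ [f]) x = ret ++ [f ++ [x]] := by
  induction ret with
  | nil => rfl
  | cons g rest ih =>
    cases rest with
    | nil => simp [pyAppendLast]
    | cons h t => simpa [pyAppendLast] using ih

-- consuming the `xs.length` owed elements appends them to the last (current) face
theorem consume_face (xs : List Int) : ∀ (rest : List Int) (ret : List (List Int)) (f : List Int),
    (xs ++ rest).foldl reconvert_facesB_step (ret ++ [f], (xs.length : Int))
      = rest.foldl reconvert_facesB_step (ret ++ [f ++ xs], 0) := by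
  induction xs with
  | nil => intro rest ret f; simp
  | cons x xs ih =>
    intro rest ret f
    have hpos : ((x :: xs).length : Int) > 0 := by simp
    simp only [List.cons_append, List.foldl_cons, reconvert_facesB_step]
    rw [if_pos hpos, pyAppendLast_snoc]
    have hlen : ((x :: xs).length : Int) - 1 = (xs.length : Int) := by simp
    rw [hlen, ih rest ret (f ++ [x])]
    simp

-- B's fold on a well-formed list, started with no elements owed, computes A's loop
-- (and ends with no elements owed)
theorem foldB_eq_loopA (l : List Int) : ∀ (ret : List (List Int)) (k : Int), k ≤ 0 →
    pvWF l = true →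
    ∃ r, r ≤ 0 ∧ l.foldl reconvert_facesB_step (ret, k) = (ret ++ reconvert_facesA_loop l, r) := by
  induction hn : l.length using Nat.strong_induction_on generalizing l with
  | _ n ih =>
    cases l with
    | nil => intro ret k hk _; exact ⟨k, hk, by simp [reconvert_facesA_loop]⟩
    | cons m rest =>
      intro ret k hk hwf
      have hn' : n = rest.length + 1 := by simpa using hn.symm
      rw [pvWF, Bool.and_eq_true, decide_eq_true_eq] at hwf
      obtain ⟨hle, hwf'⟩ := hwf
      have hk' : ¬ k > 0 := by omega
      simp only [List.foldl_cons, reconvert_facesB_step, hk', if_false]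
      have hsplit : rest = rest.take m.toNat ++ rest.drop m.toNat := (List.take_append_drop _ _).symm
      by_cases hm : m > 0
      · have hmlen : ((rest.take m.toNat).length : Int) = m := by
          simp [List.length_take, Nat.min_eq_left hle]; omega
        have hc := consume_face (rest.take m.toNat) (rest.drop m.toNat) ret []
        rw [hmlen, List.take_append_drop, List.nil_append] at hc
        rw [hc]
        obtain ⟨r, hr, heq⟩ := ih (rest.drop m.toNat).length
          (by simp only [List.length_drop, hn']; omega) _ rfl _ 0 le_rfl hwf'
        exact ⟨r, hr, by rw [heq]; simp [reconvert_facesA_loop]⟩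
      · have hm0 : m.toNat = 0 := by omega
        obtain ⟨r, hr, heq⟩ := ih rest.length (by omega) rest rfl (ret ++ [[]]) m (by omega)
          (by rwa [hm0, List.drop_zero] at hwf')
        exact ⟨r, hr, by rw [heq]; simp [reconvert_facesA_loop, hm0]⟩

-- ===== VERDICT (by name: the statement is the Claim_ definition above) =====
theorem reconvert_faces_spec : Claim_equal_reconvert_faces := by
  intro faces _ hpre
  unfold Pre_reconvert_faces at hpre
  rw [pvWellFormed_eq_pvWF] at hpre
  simp at hpre
  unfold Spec_reconvert_faces reconvert_faces reconvert_faces_alt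
  obtain ⟨r, hr, heq⟩ := foldB_eq_loopA faces [] 0 le_rfl (by simpa using hpre)
  rw [heq]
  have : ¬ r > 0 := by omega
  simp [this]
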